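-- pv_equiv track=rewrite | github.com/AMMullan/advent-of-code | years/2025/day02.py | all_repeating_patterns
-- ===== SOURCE A (Python) =====
-- def all_repeating_patterns(value: int) -> list[tuple[str, int]]:
--     s = str(value)
--     n = len(s)
--
--     lps = [0] * n
--     j = 0
--
--     for i in range(1, n):
--         while j > 0 and s[i] != s[j]:
--             j = lps[j - 1]
--         if s[i] == s[j]:
--             j += 1
--             lps[i] = j
--
--     base_period = n - lps[-1]
--
--     # No repetition at all
--     if base_period == n:
--         return []
--
--     patterns: list[tuple[str, int]] = []
--
--     period = base_period
--     while period <= n: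
--         if n % period == 0:
--             patterns.append((s[:period], n // period))
--         period += base_period
--
--     return patterns
-- ===== SOURCE B (Python) =====
-- def all_repeating_patterns(value: int) -> list[tuple[str, int]]:
--     s = str(value)
--     n = len(s)
--     out = []
--     for d in range(1, n):
--         if n % d == 0 and s[:d] * (n // d) == s:
--             out.append((s[:d], n // d))
--     if not out:
--         return []
--     out.append((s, 1))
--     return out
-- ===== Notes on version B (the rewrite author's own statement) =====
-- stated objective: simpler
-- what changed: Replaces the KMP failure-table computation and the multiples-of-the-base-period walk by a direct scan over the proper divisors d of len(str(value)), keeping d when s[:d]*(n//d) == s, with (s,1) appended only when a proper repetition exists.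
import Mathlib
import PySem

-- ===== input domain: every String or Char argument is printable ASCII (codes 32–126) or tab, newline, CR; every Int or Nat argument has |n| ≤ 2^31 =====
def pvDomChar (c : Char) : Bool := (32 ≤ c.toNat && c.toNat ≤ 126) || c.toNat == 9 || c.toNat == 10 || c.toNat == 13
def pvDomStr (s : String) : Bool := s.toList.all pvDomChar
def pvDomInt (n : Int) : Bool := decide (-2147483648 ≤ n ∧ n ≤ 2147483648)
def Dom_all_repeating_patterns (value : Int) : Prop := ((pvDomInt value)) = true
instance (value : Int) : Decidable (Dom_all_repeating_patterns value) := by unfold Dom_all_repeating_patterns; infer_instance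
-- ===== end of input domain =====

-- B replaces A's KMP failure-table computation and multiples-of-the-base-period walk by a direct
-- scan over the proper divisors d of len(str(value)), keeping d when s[:d]*(n//d) == s ('simpler').

-- ===== PORT A =====
-- inner loop 'while j > 0 and s[i] != s[j]: j = lps[j - 1]'; the descent strictly decreases j,
-- so fuel = len(s) (always ≥ j) makes the recursion reach the real exit condition on every input
def kmpWhile (s : List Char) (lps : List Int) (c : Char) : Nat → Int → Int
  | 0, j => j
  | fuel+1, j =>
    if 0 < j ∧ PySem.List.pyGetD s j ' ' ≠ c then
      kmpWhile s lps c fuel (PySem.List.pyGetD lps (j - 1) 0)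
    else j

-- body of 'for i in range(1, n)' over the state (lps, j); s[i], s[j] are always in range here
def kmpStep (s : List Char) (st : List Int × Int) (i : Int) : List Int × Int :=
  let j := kmpWhile s st.1 (PySem.List.pyGetD s i ' ') s.length st.2
  if PySem.List.pyGetD s i ' ' = PySem.List.pyGetD s j ' ' then
    (PySem.List.pySetD st.1 i (j + 1), j + 1)
  else (st.1, j)

-- 'while period <= n: … period += base_period'; period grows by base ≥ 1 each turn, so
-- fuel = len(s) + 1 iterations always reach period > n
def patLoop (s : List Char) (n base : Int) : Nat → Int → List (String × Int) → List (String × Int)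
  | 0, _, acc => acc
  | fuel+1, period, acc =>
    if period ≤ n then
      patLoop s n base fuel (period + base)
        (if PySem.Int.mod n period = 0 then
          acc ++ [(String.ofList (PySem.List.slice s none (some period)), PySem.Int.floordiv n period)]
        else acc)
    else acc

-- str(value) is handled as its list of code points (PySem.Str functions are thin wrappers over
-- PySem.Chars on .toList); output strings are rebuilt with String.ofList
def all_repeating_patterns (value : Int) : List (String × Int) :=
  let s := (PySem.Int.toStr value).toList
  let n : Int := (s.length : Int)
  let st := (PySem.List.pyRange 1 n 1).foldl (kmpStep s) (List.replicate s.length (0 : Int), 0)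
  let base := n - PySem.List.pyGetD st.1 (-1) 0
  if base = n then []
  else patLoop s n base (s.length + 1) base []

-- ===== PORT B =====
-- Python's  str * int  (k copies concatenated, empty for k ≤ 0): exact, ported by hand
def strMul (cs : List Char) (k : Int) : List Char := (List.replicate k.toNat cs).flatten

def all_repeating_patterns_alt (value : Int) : List (String × Int) :=
  let s := (PySem.Int.toStr value).toList
  let n : Int := (s.length : Int)
  let out := (PySem.List.pyRange 1 n 1).foldl (fun acc d =>
      if PySem.Int.mod n d = 0 ∧ strMul (PySem.List.slice s none (some d)) (PySem.Int.floordiv n d) = s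
      then acc ++ [(String.ofList (PySem.List.slice s none (some d)), PySem.Int.floordiv n d)]
      else acc) []
  if out = [] then [] else out ++ [(String.ofList s, 1)]

-- ===== PRECONDITION & SPEC =====
def Spec_all_repeating_patterns (value : Int) (out : List (String × Int)) : Prop := out = all_repeating_patterns_alt value
instance (value : Int) (out : List (String × Int)) : Decidable (Spec_all_repeating_patterns value out) := by unfold Spec_all_repeating_patterns; infer_instance

-- ===== CLAIM (what is proved, stated in full; the proofs are below) =====
def Claim_equal_all_repeating_patterns : Prop := ∀ (value : Int), Dom_all_repeating_patterns value → Spec_all_repeating_patterns value (all_repeating_patterns value)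

-- ===== LEMMAS AND PROOFS =====

-- `brd l b`: l has a proper border of length b (a length-b strict prefix that is also a suffix)
def brd (l : List Char) (b : Nat) : Prop := b < l.length ∧ l.take b = l.drop (l.length - b)

-- length of the longest proper border of l
def mb (l : List Char) : Nat :=
  Nat.findGreatest (fun b => b < l.length ∧ l.take b = l.drop (l.length - b)) (l.length - 1)

-- `per l p`: p is a period of l
def per (l : List Char) (p : Nat) : Prop := ∀ i, i + p < l.length → l[i]? = l[i + p]?

-- the output entry both programs build for a period d
def fpat (l : List Char) (d : Int) : String × Int :=
  (String.ofList (PySem.List.slice l none (some d)), PySem.Int.floordiv (l.length : Int) d)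

lemma brd_zero {l : List Char} (h : l ≠ []) : brd l 0 := by
  constructor
  · exact List.length_pos_iff.mpr h
  · simp

lemma le_mb {l : List Char} {b : Nat} (h : brd l b) : b ≤ mb l := by
  refine Nat.le_findGreatest ?_ h
  have := h.1; omega

lemma mb_brd {l : List Char} (h : l ≠ []) : brd l (mb l) := by
  have h0 := brd_zero h
  exact Nat.findGreatest_spec (Nat.zero_le _) h0

lemma mb_lt {l : List Char} (h : l ≠ []) : mb l < l.length := (mb_brd h).1

lemma mb_eq_of {l : List Char} {m : Nat} (h : l ≠ []) (hb : brd l m)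
    (hmax : ∀ b, brd l b → b ≤ m) : mb l = m :=
  le_antisymm (hmax _ (mb_brd h)) (le_mb hb)


lemma brd_trans {l : List Char} {b c : Nat} (hc : brd l c) (hb : brd (l.take c) b) : brd l b := by
  obtain ⟨hc1, hc2⟩ := hc
  obtain ⟨hb1, hb2⟩ := hb
  simp only [List.length_take] at hb1 hb2
  have hbc : b < c := by omega
  refine ⟨by omega, ?_⟩
  have h1 : (l.take c).take b = l.take b := by
    rw [List.take_take]; congr 1; omega
  have h2 : (l.take c).drop (min c l.length - b) = l.drop (l.length - b) := by
    rw [hc2, List.drop_drop]; congr 1; omega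
  rw [h1, h2] at hb2; exact hb2

lemma brd_of_lt {l : List Char} {b c : Nat} (hb : brd l b) (hc : brd l c) (h : b < c) :
    brd (l.take c) b := by
  obtain ⟨hb1, hb2⟩ := hb
  obtain ⟨hc1, hc2⟩ := hc
  refine ⟨by simp; omega, ?_⟩
  simp only [List.length_take]
  have h1 : (l.take c).take b = l.take b := by
    rw [List.take_take]; congr 1; omega
  have h2 : (l.take c).drop (min c l.length - b) = l.drop (l.length - b) := by
    rw [hc2, List.drop_drop]; congr 1; omega
  rw [h1, h2, hb2]

lemma brd_snoc {l : List Char} {a : Char} {b : Nat} :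
    brd (l ++ [a]) (b + 1) ↔ brd l b ∧ l[b]? = some a := by
  constructor
  · rintro ⟨h1, h2⟩
    simp only [List.length_append, List.length_cons, List.length_nil] at h1
    have hb : b < l.length := by omega
    have ht : (l ++ [a]).take (b + 1) = l.take b ++ [l[b]] := by
      rw [List.take_append_of_le_length (by omega), List.take_add_one]
      simp [List.getElem?_eq_getElem hb]
    have hd : (l ++ [a]).drop (l.length + 1 - (b + 1)) = l.drop (l.length - b) ++ [a] := by
      have : l.length + 1 - (b + 1) = l.length - b := by omega
      rw [this, List.drop_append_of_le_length (by omega)]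
    rw [ht] at h2
    have hlen2 : l.length + 1 - (b+1) = l.length - b := by omega
    rw [show (l ++ [a]).length = l.length + 1 by simp] at h2
    rw [hlen2, List.drop_append_of_le_length (by omega)] at h2
    have hinj := List.append_inj h2 (by simp [List.length_take, List.length_drop]; omega)
    refine ⟨⟨hb, hinj.1⟩, ?_⟩
    have := hinj.2
    simp at this
    simp [List.getElem?_eq_getElem hb, this]
  · rintro ⟨⟨h1, h2⟩, h3⟩
    have hb : b < l.length := h1
    have ha : l[b] = a := by simpa [List.getElem?_eq_getElem hb] using h3
    refine ⟨by simp; omega, ?_⟩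
    rw [show (l ++ [a]).length = l.length + 1 by simp]
    have hlen2 : l.length + 1 - (b+1) = l.length - b := by omega
    rw [hlen2, List.take_append_of_le_length (by omega), List.take_add_one,
      List.drop_append_of_le_length (by omega), List.getElem?_eq_getElem hb, h2, ha]
    simp

lemma per_iff_brd {l : List Char} {p : Nat} (hp : 0 < p) (hpn : p ≤ l.length) :
    per l p ↔ brd l (l.length - p) := by
  have hlen : l.length - (l.length - p) = p := by omega
  constructor
  · intro h
    refine ⟨by omega, ?_⟩
    rw [hlen]
    apply List.ext_getElem?
    intro i
    rcases Nat.lt_or_ge i (l.length - p) with hi | hi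
    · rw [List.getElem?_take_of_lt hi, List.getElem?_drop]
      have := h i (by omega)
      rw [this]; congr 1; omega
    · rw [List.getElem?_eq_none (by simp; omega), List.getElem?_eq_none (by simp; omega)]
  · intro ⟨_, h⟩ i hi
    rw [hlen] at h
    have h1 : (l.take (l.length - p))[i]? = (l.drop p)[i]? := by rw [h]
    rw [List.getElem?_take_of_lt (by omega), List.getElem?_drop] at h1
    rw [h1]; congr 1; omega

lemma per_of_dvd {l : List Char} {p q : Nat} (_hp : 0 < p) (h : per l p) (hd : p ∣ q) :
    per l q := by
  obtain ⟨k, rfl⟩ := hd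
  induction k with
  | zero => intro i hi; simp
  | succ k ih =>
    intro i hi
    have hm : p * (k + 1) = p * k + p := by ring
    have h1 : l[i]? = l[i + p]? := h i (by omega)
    have h2 : l[i + p]? = l[i + p + p * k]? := ih (i + p) (by omega)
    rw [h1, h2]; congr 1; omega

lemma fw_sub {l : List Char} {p q : Nat} (hpq : p < q) (hq : p + q ≤ l.length)
    (h1 : per l p) (h2 : per l q) : per l (q - p) := by
  intro i hi
  rcases Nat.lt_or_ge i p with hip | hip
  · have e1 : l[i]? = l[i + q]? := h2 i (by omega)
    have e2 : l[i + (q - p)]? = l[i + (q - p) + p]? := h1 _ (by omega)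
    rw [e1, e2]; congr 1; omega
  · have e1 : l[i - p]? = l[i]? := by
      have := h1 (i - p) (by omega); rw [this]; congr 1; omega
    have e2 : l[i - p]? = l[i - p + q]? := h2 _ (by omega)
    rw [← e1, e2]; congr 1; omega

lemma fw {l : List Char} : ∀ s p q, p + q = s → 0 < p → 0 < q → p + q ≤ l.length →
    per l p → per l q → per l (Nat.gcd p q) := by
  intro s
  induction s using Nat.strong_induction_on with
  | _ s ih =>
    intro p q hs hp hq hle h1 h2
    rcases Nat.lt_trichotomy p q with h | h | h
    · have h3 : per l (q - p) := fw_sub h hle h1 h2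
      have h4 := ih q (by omega) p (q - p) (by omega) hp (by omega) (by omega) h1 h3
      rwa [Nat.gcd_sub_self_right (by omega)] at h4
    · subst h; rwa [Nat.gcd_self]
    · have h3 : per l (p - q) := fw_sub h (by omega) h2 h1
      have h4 := ih p (by omega) q (p - q) (by omega) hq (by omega) (by omega) h2 h3
      rwa [Nat.gcd_sub_self_right (by omega), Nat.gcd_comm] at h4

lemma rep_of_per : ∀ (m : Nat) (l : List Char) (d : Nat), 0 < d → l.length = m * d →
    per l d → (List.replicate m (l.take d)).flatten = l := by
  intro m
  induction m with
  | zero =>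
    intro l d _ hlen _
    simp at hlen ⊢
    exact hlen
  | succ m ih =>
    intro l d hd hlen hper
    have hsm : (m + 1) * d = m * d + d := by ring
    have hdlen : d ≤ l.length := by omega
    have hlenr : (l.drop d).length = m * d := by simp; omega
    have hperr : per (l.drop d) d := by
      intro i hi
      rw [List.getElem?_drop, List.getElem?_drop]
      have hi' : i + d < m * d := by simpa [hlenr] using hi
      have := hper (d + i) (by omega)
      rw [this]; congr 1; omega
    have hIH := ih (l.drop d) d hd hlenr hperr
    have hrep : List.replicate m (l.take d) = List.replicate m ((l.drop d).take d) := by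
      cases m with
      | zero => rfl
      | succ m' =>
        have hsm' : (m' + 1) * d = m' * d + d := by ring
        congr 1
        apply List.ext_getElem?
        intro i
        rcases Nat.lt_or_ge i d with hi | hi
        · rw [List.getElem?_take_of_lt hi, List.getElem?_take_of_lt hi, List.getElem?_drop]
          have := hper i (by omega)
          rw [this]; congr 1; omega
        · rw [List.getElem?_eq_none (by simp; omega), List.getElem?_eq_none (by simp; omega)]
    rw [List.replicate_succ, List.flatten_cons, hrep, hIH, List.take_append_drop]

lemma flatten_replicate_comm (t : List Char) (k : Nat) :
    (List.replicate k t).flatten ++ t = t ++ (List.replicate k t).flatten := by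
  have h1 : (List.replicate (k+1) t).flatten = t ++ (List.replicate k t).flatten := by
    rw [List.replicate_succ, List.flatten_cons]
  have h2 : (List.replicate (k+1) t).flatten = (List.replicate k t).flatten ++ t := by
    rw [List.replicate_succ', List.flatten_append]; simp
  rw [← h1, h2]

lemma per_of_rep {l : List Char} {d : Nat} (hd : 0 < d) (hdvd : d ∣ l.length)
    (h : (List.replicate (l.length / d) (l.take d)).flatten = l) : per l d := by
  have hcancel := Nat.div_mul_cancel hdvd
  rcases Nat.eq_zero_or_pos (l.length / d) with hm | hm
  · rw [hm] at hcancel; simp at hcancel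
    intro i hi; omega
  · have hdlen : d ≤ l.length := by
      have h1 : 1 * d ≤ l.length / d * d := Nat.mul_le_mul_right d hm
      omega
    set m := l.length / d with hmdef
    set t := l.take d with htdef
    have hlt : t.length = d := by simp [htdef]; omega
    have hsplit : t ++ (List.replicate (m-1) t).flatten = l := by
      rw [← h]
      have hm1 : m = (m - 1) + 1 := by omega
      conv_rhs => rw [hm1, List.replicate_succ, List.flatten_cons]
    have hsplit2 : (List.replicate (m-1) t).flatten ++ t = l := by
      rw [flatten_replicate_comm]; exact hsplit
    have hxlen : ((List.replicate (m-1) t).flatten).length = l.length - d := by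
      have h2 : (t ++ (List.replicate (m-1) t).flatten).length = l.length := by rw [hsplit]
      simp only [List.length_append, hlt] at h2; omega
    rw [per_iff_brd hd hdlen]
    refine ⟨by omega, ?_⟩
    have e : l.length - (l.length - d) = d := by omega
    rw [e]
    have hdrop : l.drop d = (List.replicate (m-1) t).flatten := by
      have h3 := @List.drop_left _ t ((List.replicate (m-1) t).flatten)
      rw [hlt, hsplit] at h3; exact h3
    have htake : l.take (l.length - d) = (List.replicate (m-1) t).flatten := by
      have h4 := @List.take_left _ ((List.replicate (m-1) t).flatten) t
      rw [hxlen, hsplit2] at h4; exact h4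
    rw [hdrop, htake]

lemma per_base {l : List Char} (hne : l ≠ []) : per l (l.length - mb l) := by
  have h1 := mb_brd hne
  have h2 := mb_lt hne
  have hlen : 0 < l.length := List.length_pos_iff.mpr hne
  rw [per_iff_brd (by omega) (by omega)]
  have e : l.length - (l.length - mb l) = mb l := by omega
  rw [e]; exact h1

lemma base_le_of_per {l : List Char} {d : Nat} (_hne : l ≠ []) (hd0 : 0 < d) (hdn : d < l.length)
    (h : per l d) : l.length - mb l ≤ d := by
  rw [per_iff_brd (by omega) (by omega)] at h
  have := le_mb h
  omega

lemma char_div {l : List Char} {d : Nat} (hne : l ≠ []) (hd0 : 0 < d) (hdn : d < l.length)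
    (hdvd : d ∣ l.length) : (per l d ↔ (l.length - mb l) ∣ d) := by
  have hlen : 0 < l.length := List.length_pos_iff.mpr hne
  have hmb := mb_lt hne
  set base := l.length - mb l with hbase
  have hbase0 : 0 < base := by omega
  constructor
  · intro h
    -- d is a proper divisor, so 2 * d ≤ length
    have h2d : 2 * d ≤ l.length := by
      obtain ⟨k, hk⟩ := hdvd
      have hk2 : 2 ≤ k := by nlinarith
      nlinarith
    have hbd : base ≤ d := base_le_of_per hne hd0 hdn h
    have hpb : per l base := per_base hne
    have hg := fw (base + d) base d rfl hbase0 hd0 (by omega) hpb h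
    have hgpos : 0 < Nat.gcd base d := Nat.gcd_pos_of_pos_left d hbase0
    have hgle : Nat.gcd base d ≤ base := Nat.le_of_dvd hbase0 (Nat.gcd_dvd_left base d)
    have hbg : base ≤ Nat.gcd base d := by
      apply base_le_of_per hne hgpos (by omega) hg
    have : Nat.gcd base d = base := by omega
    rw [← this]; exact Nat.gcd_dvd_right base d
  · intro h
    exact per_of_dvd hbase0 (per_base hne) h

lemma eq_of_sorted_lt_of_mem_iff : ∀ {xs ys : List Int}, xs.Pairwise (· < ·) →
    ys.Pairwise (· < ·) → (∀ a, a ∈ xs ↔ a ∈ ys) → xs = ys := by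
  intro xs
  induction xs with
  | nil =>
    intro ys _ _ h
    cases ys with
    | nil => rfl
    | cons y ys => exact absurd ((h y).mpr (by simp)) (by simp)
  | cons x xs ih =>
    intro ys hx hy h
    cases ys with
    | nil => exact absurd ((h x).mp (by simp)) (by simp)
    | cons y ys =>
      have hxy : x = y := by
        have h1 := (h x).mp (by simp)
        have h2 := (h y).mpr (by simp)
        simp at h1 h2
        rcases h1 with h1 | h1
        · exact h1
        · rcases h2 with h2 | h2
          · exact h2.symm
          · have := (List.pairwise_cons.mp hy).1 x h1
            have := (List.pairwise_cons.mp hx).1 y h2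
            omega
      subst hxy
      congr 1
      apply ih (List.pairwise_cons.mp hx).2 (List.pairwise_cons.mp hy).2
      intro a
      have hax : a ∈ xs → a ≠ x := fun ha => by
        have := (List.pairwise_cons.mp hx).1 a ha; omega
      have hay : a ∈ ys → a ≠ x := fun ha => by
        have := (List.pairwise_cons.mp hy).1 a ha; omega
      constructor
      · intro ha
        have := (h a).mp (by simp [ha])
        simp at this
        rcases this with h' | h'
        · exact absurd h' (hax ha)
        · exact h'
      · intro ha
        have := (h a).mpr (by simp [ha])
        simp at this
        rcases this with h' | h'
        · exact absurd h' (hay ha)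
        · exact h'

lemma pyGetD_char {s : List Char} {k : Nat} (h : k < s.length) :
    PySem.List.pyGetD s (k : Int) ' ' = s[k] := by
  rw [PySem.List.pyGetD_natCast, List.getD_eq_getElem?_getD, List.getElem?_eq_getElem h]
  rfl

lemma take_of_take {s : List Char} {j i : Nat} (h : j ≤ i) : (s.take i).take j = s.take j := by
  rw [List.take_take]; congr 1; omega

lemma kmpWhile_spec (s : List Char) (lps : List Int) (i : Nat) (hi : i < s.length) (_hi1 : 1 ≤ i)
    (c : Char)
    (hlps : ∀ k, k < i → PySem.List.pyGetD lps (k : Int) 0 = (mb (s.take (k+1)) : Int)) :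
    ∀ fuel (j : Nat), j < fuel → brd (s.take i) j →
      (∀ b, brd (s.take i ++ [c]) b → b ≤ j + 1) →
    ∃ J : Nat, kmpWhile s lps c fuel (j : Int) = (J : Int) ∧
      brd (s.take i) J ∧ (∀ b, brd (s.take i ++ [c]) b → b ≤ J + 1) ∧
      (J = 0 ∨ s[J]? = some c) := by
  intro fuel
  induction fuel with
  | zero => intro j hj; omega
  | succ fuel ih =>
    intro j hjf hbj hmax
    have hti : (s.take i).length = i := by simp; omega
    have hji : j < i := by have := hbj.1; omega
    rw [kmpWhile]
    by_cases hcond : 0 < (j : Int) ∧ PySem.List.pyGetD s (j : Int) ' ' ≠ c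
    · rw [if_pos hcond]
      have hj1 : 1 ≤ j := by exact_mod_cast hcond.1
      have hsj : s[j] ≠ c := by
        have := hcond.2; rwa [pyGetD_char (by omega)] at this
      -- the stored failure value: lps[j-1] = mb (s.take j)
      have hcast : (j : Int) - 1 = ((j - 1 : Nat) : Int) := by omega
      have hstep : PySem.List.pyGetD lps ((j : Int) - 1) 0 = (mb (s.take j) : Int) := by
        rw [hcast, hlps (j-1) (by omega), show j - 1 + 1 = j by omega]
      rw [hstep]
      have htj : (s.take i).take j = s.take j := take_of_take (by omega)
      have htjne : s.take j ≠ [] := by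
        have : (s.take j).length = j := by simp; omega
        intro hnil; rw [hnil] at this; simp at this; omega
      have hmbj : mb (s.take j) < j := by
        have := mb_lt htjne
        have hl : (s.take j).length = j := by simp; omega
        omega
      have hbj' : brd (s.take i) (mb (s.take j)) := by
        apply brd_trans hbj
        rw [htj]
        exact mb_brd htjne
      have hmax' : ∀ b, brd (s.take i ++ [c]) b → b ≤ mb (s.take j) + 1 := by
        intro b hb
        cases b with
        | zero => omega
        | succ b' =>
          have ⟨hb1, hb2⟩ := brd_snoc.mp hb
          have hble : b' + 1 ≤ j + 1 := hmax _ hb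
          have hbne : b' ≠ j := by
            intro he; subst he
            rw [List.getElem?_take_of_lt hji, List.getElem?_eq_getElem (by omega)] at hb2
            exact hsj (by injection hb2)
          have hblt : b' < j := by omega
          have := le_mb (l := s.take j) (by rw [← htj]; exact brd_of_lt hb1 hbj hblt)
          omega
      exact ih (mb (s.take j)) (by omega) hbj' hmax'
    · rw [if_neg hcond]
      refine ⟨j, rfl, hbj, hmax, ?_⟩
      rcases Nat.eq_zero_or_pos j with h0 | hpos
      · exact Or.inl h0
      · right
        have : ¬ PySem.List.pyGetD s (j : Int) ' ' ≠ c := by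
          intro hne; exact hcond ⟨by exact_mod_cast hpos, hne⟩
        rw [pyGetD_char (by omega)] at this
        rw [List.getElem?_eq_getElem (by omega)]
        simpa using this

lemma take_snoc {s : List Char} {i : Nat} (hi : i < s.length) :
    s.take (i+1) = s.take i ++ [s[i]] := by
  rw [List.take_add_one]
  simp [List.getElem?_eq_getElem hi]

lemma kmpStep_inv (s : List Char) (i : Nat) (hi1 : 1 ≤ i) (hi : i < s.length)
    (lps : List Int)
    (hlen : lps.length = s.length)
    (hzero : ∀ k, i ≤ k → k < s.length → PySem.List.pyGetD lps (k : Int) 0 = 0)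
    (hprev : ∀ k, k < i → PySem.List.pyGetD lps (k : Int) 0 = (mb (s.take (k+1)) : Int)) :
    ∃ lps', kmpStep s (lps, (mb (s.take i) : Int)) (i : Int) = (lps', (mb (s.take (i+1)) : Int)) ∧
      lps'.length = s.length ∧
      (∀ k, i + 1 ≤ k → k < s.length → PySem.List.pyGetD lps' (k : Int) 0 = 0) ∧
      (∀ k, k < i + 1 → PySem.List.pyGetD lps' (k : Int) 0 = (mb (s.take (k+1)) : Int)) := by
  have hti : (s.take i).length = i := by simp; omega
  have htine : s.take i ≠ [] := by
    intro hnil; rw [hnil] at hti; simp at hti; omega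
  have hsnoc : s.take (i+1) = s.take i ++ [s[i]] := take_snoc hi
  have hc : PySem.List.pyGetD s (i : Int) ' ' = s[i] := pyGetD_char hi
  -- run the while loop
  have hmax0 : ∀ b, brd (s.take i ++ [s[i]]) b → b ≤ mb (s.take i) + 1 := by
    intro b hb
    cases b with
    | zero => omega
    | succ b' =>
      have ⟨hb1, _⟩ := brd_snoc.mp hb
      have := le_mb hb1; omega
  obtain ⟨J, hJrun, hJbrd, hJmax, hJstop⟩ :=
    kmpWhile_spec s lps i hi hi1 s[i] hprev s.length (mb (s.take i))
      (by have := mb_lt htine; omega) (mb_brd htine) hmax0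
  have hJi : J < i := by have := hJbrd.1; omega
  unfold kmpStep
  simp only [hc, hJrun]
  by_cases heq : s[i] = PySem.List.pyGetD s (J : Int) ' '
  · rw [if_pos heq]
    rw [pyGetD_char (by omega)] at heq
    have hbrdJ1 : brd (s.take (i+1)) (J+1) := by
      rw [hsnoc]
      refine brd_snoc.mpr ⟨hJbrd, ?_⟩
      rw [List.getElem?_take_of_lt hJi, List.getElem?_eq_getElem (by omega), heq]
    have hmbJ1 : mb (s.take (i+1)) = J + 1 := by
      apply mb_eq_of (l := s.take (i+1)) (by rw [hsnoc]; intro h; have := congrArg List.length h; simp at this; subst this; simp at hi) hbrdJ1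
      intro b hb
      rw [hsnoc] at hb
      exact hJmax b hb
    refine ⟨PySem.List.pySetD lps (i : Int) ((J : Int) + 1), ?_, ?_, ?_, ?_⟩
    · rw [hmbJ1]; push_cast; rfl
    · rw [PySem.List.length_pySetD]; exact hlen
    · intro k hk1 hk2
      have : ((J : Int) + 1) = ((J + 1 : Nat) : Int) := by push_cast; ring
      rw [this, PySem.List.pyGetD_pySetD_natCast lps i k _ 0 (by omega)]
      rw [if_neg (by omega)]
      exact hzero k (by omega) hk2
    · intro k hk
      have : ((J : Int) + 1) = ((J + 1 : Nat) : Int) := by push_cast; ring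
      rw [this, PySem.List.pyGetD_pySetD_natCast lps i k _ 0 (by omega)]
      by_cases hki : k = i
      · rw [if_pos hki, hki, hmbJ1]
      · rw [if_neg hki]
        exact hprev k (by omega)
  · rw [if_neg heq]
    rw [pyGetD_char (by omega)] at heq
    have hJ0 : J = 0 := by
      rcases hJstop with h | h
      · exact h
      · exfalso
        rw [List.getElem?_eq_getElem (by omega)] at h
        exact heq (by injection h with h'; exact h'.symm)
    subst hJ0
    have hmb0 : mb (s.take (i+1)) = 0 := by
      apply mb_eq_of (l := s.take (i+1)) (by rw [hsnoc]; intro h; have := congrArg List.length h; simp at this; subst this; simp at hi)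
      · exact ⟨by simp; omega, by simp⟩
      · intro b hb
        cases b with
        | zero => omega
        | succ b' =>
          exfalso
          rw [hsnoc] at hb
          have ⟨hb1, hb2⟩ := brd_snoc.mp hb
          have hble := hJmax (b'+1) hb
          have : b' = 0 := by omega
          subst this
          rw [List.getElem?_take_of_lt (by omega), List.getElem?_eq_getElem (by omega)] at hb2
          injection hb2 with h'
          exact heq h'.symm
    refine ⟨lps, ?_, hlen, ?_, ?_⟩
    · rw [hmb0]
    · intro k hk1 hk2; exact hzero k (by omega) hk2
    · intro k hk
      by_cases hki : k = i
      · subst hki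
        rw [hzero k (by omega) (by omega), hmb0]; rfl
      · exact hprev k (by omega)

lemma mb_take_one {s : List Char} (h : s ≠ []) : mb (s.take 1) = 0 := by
  unfold mb
  have : (s.take 1).length = 1 := by simp; exact List.length_pos_iff.mpr h
  rw [this]
  simp

lemma kmp_fold (s : List Char) (hs : s ≠ []) : ∀ i : Nat, 1 ≤ i → i ≤ s.length →
    ∃ lps, (PySem.List.pyRange 1 (i : Int) 1).foldl (kmpStep s) (List.replicate s.length (0:Int), 0)
        = (lps, (mb (s.take i) : Int)) ∧
      lps.length = s.length ∧
      (∀ k, i ≤ k → k < s.length → PySem.List.pyGetD lps (k : Int) 0 = 0) ∧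
      (∀ k, k < i → PySem.List.pyGetD lps (k : Int) 0 = (mb (s.take (k+1)) : Int)) := by
  intro i
  induction i with
  | zero => omega
  | succ i ih =>
    intro _ hle
    rcases Nat.eq_zero_or_pos i with h0 | hpos
    · subst h0
      refine ⟨List.replicate s.length 0, ?_, by simp, ?_, ?_⟩
      · rw [show ((1:Nat) : Int) = 1 by norm_num, PySem.List.pyRange_one_eq_nil (by norm_num)]
        simp [mb_take_one hs]
      · intro k _ hk2
        rw [PySem.List.pyGetD_natCast]
        simp [List.getD_eq_getElem?_getD, List.getElem?_replicate, if_pos hk2]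
      · intro k hk
        interval_cases k
        rw [PySem.List.pyGetD_natCast, mb_take_one hs]
        have h0 : 0 < s.length := by omega
        simp [List.getD_eq_getElem?_getD, h0]
    · obtain ⟨lps, hfold, hlen, hzero, hprev⟩ := ih hpos (by omega)
      obtain ⟨lps', hstep, hlen', hzero', hprev'⟩ :=
        kmpStep_inv s i hpos (by omega) lps hlen hzero hprev
      refine ⟨lps', ?_, hlen', hzero', hprev'⟩
      have hr : ((i + 1 : Nat) : Int) = (i : Int) + 1 := by push_cast; ring
      rw [hr, PySem.List.pyRange_one_succ_right (by omega), List.foldl_append, hfold]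
      simpa using hstep

lemma patLoop_spec (l : List Char) (base : Int) (hb : 0 < base) :
    ∀ (fuel : Nat) (k : Int) (acc : List (String × Int)), 0 < k →
      (l.length : Int) < k * base + fuel * base →
    patLoop l (l.length : Int) base fuel (k * base) acc =
      acc ++ (((PySem.List.pyRange k (PySem.Int.floordiv (l.length : Int) base + 1)).map (· * base)).filter
        (fun d => decide (PySem.Int.mod (l.length : Int) d = 0))).map (fpat l) := by
  intro fuel
  induction fuel with
  | zero =>
    intro k acc hk hfuel
    rw [patLoop, PySem.List.pyRange_one_eq_nil]
    · simp
    · have := (PySem.Int.floordiv_lt_iff_lt_mul (a := (l.length : Int)) (q := k) hb).mpr (by omega)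
      omega
  | succ fuel ih =>
    intro k acc hk hfuel
    rw [patLoop]
    by_cases hkn : k * base ≤ (l.length : Int)
    · rw [if_pos hkn]
      have hkK : k ≤ PySem.Int.floordiv (l.length : Int) base :=
        (PySem.Int.le_floordiv_iff_mul_le hb).mpr hkn
      have hcons : PySem.List.pyRange k (PySem.Int.floordiv (l.length : Int) base + 1) =
          k :: PySem.List.pyRange (k+1) (PySem.Int.floordiv (l.length : Int) base + 1) := by
        exact PySem.List.pyRange_one_cons (by omega)
      have hstep : k * base + base = (k + 1) * base := by ring
      have hih := ih (k+1)
        (if PySem.Int.mod (l.length : Int) (k * base) = 0 then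
          acc ++ [(String.ofList (PySem.List.slice l none (some (k * base))), PySem.Int.floordiv (l.length : Int) (k * base))]
        else acc) (by omega) (by push_cast at hfuel ⊢; nlinarith)
      rw [hstep, hih, hcons]
      simp only [List.map_cons, List.filter_cons]
      by_cases hmod : PySem.Int.mod (l.length : Int) (k * base) = 0
      · rw [if_pos hmod]
        simp [hmod, fpat]
      · rw [if_neg hmod]
        simp [hmod]
    · rw [if_neg hkn]
      rw [PySem.List.pyRange_one_eq_nil]
      · simp
      · have := (PySem.Int.floordiv_lt_iff_lt_mul (a := (l.length : Int)) (q := k) hb).mpr (by omega)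
        omega

lemma Bfold_eq (l : List Char) :
    (PySem.List.pyRange 1 (l.length : Int)).foldl (fun acc d =>
      if PySem.Int.mod (l.length : Int) d = 0 ∧
          strMul (PySem.List.slice l none (some d)) (PySem.Int.floordiv (l.length : Int) d) = l
      then acc ++ [(String.ofList (PySem.List.slice l none (some d)), PySem.Int.floordiv (l.length : Int) d)]
      else acc) [] =
    ((PySem.List.pyRange 1 (l.length : Int)).filter (fun d =>
      decide (PySem.Int.mod (l.length : Int) d = 0 ∧
        strMul (PySem.List.slice l none (some d)) (PySem.Int.floordiv (l.length : Int) d) = l))).map (fpat l) := by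
  have hbody : (fun (acc : List (String × Int)) (d : Int) =>
      if PySem.Int.mod (l.length : Int) d = 0 ∧
          strMul (PySem.List.slice l none (some d)) (PySem.Int.floordiv (l.length : Int) d) = l
      then acc ++ [(String.ofList (PySem.List.slice l none (some d)), PySem.Int.floordiv (l.length : Int) d)]
      else acc) = (fun acc d =>
      if (fun d => decide (PySem.Int.mod (l.length : Int) d = 0 ∧
          strMul (PySem.List.slice l none (some d)) (PySem.Int.floordiv (l.length : Int) d) = l)) d = true
      then acc ++ [fpat l d] else acc) := by
    funext acc d
    by_cases h : PySem.Int.mod (l.length : Int) d = 0 ∧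
        strMul (PySem.List.slice l none (some d)) (PySem.Int.floordiv (l.length : Int) d) = l
    · simp [h, fpat]
    · simp [h]
  rw [hbody, PySem.List.foldl_append_if]
  simp

lemma Q_iff (l : List Char) (hne : l ≠ []) {d : Int} (h1 : 1 ≤ d) (h2 : d < (l.length : Int)) :
    (PySem.Int.mod (l.length : Int) d = 0 ∧
      strMul (PySem.List.slice l none (some d)) (PySem.Int.floordiv (l.length : Int) d) = l)
    ↔ (((l.length - mb l : Nat) : Int) ∣ d ∧ d ∣ (l.length : Int)) := by
  have hd0 : 0 ≤ d := by omega
  obtain ⟨dn, rfl⟩ : ∃ dn : Nat, d = (dn : Int) := ⟨d.toNat, (Int.toNat_of_nonneg hd0).symm⟩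
  have hdn1 : 1 ≤ dn := by exact_mod_cast h1
  have hdnl : dn < l.length := by exact_mod_cast h2
  rw [PySem.Int.mod_eq_zero_iff_dvd, PySem.List.slice_to_natCast, PySem.Int.floordiv_natCast]
  have hsm : strMul (l.take dn) ((l.length / dn : Nat) : Int) =
      (List.replicate (l.length / dn) (l.take dn)).flatten := by
    unfold strMul; rw [Int.toNat_natCast]
  rw [hsm, Int.natCast_dvd_natCast, Int.natCast_dvd_natCast]
  constructor
  · rintro ⟨hdvd, hrep⟩
    exact ⟨(char_div hne (by omega) hdnl hdvd).mp (per_of_rep (by omega) hdvd hrep), hdvd⟩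
  · rintro ⟨hbd, hdvd⟩
    refine ⟨hdvd, ?_⟩
    exact rep_of_per (l.length / dn) l dn (by omega) (Nat.div_mul_cancel hdvd).symm
      ((char_div hne (by omega) hdnl hdvd).mpr hbd)

lemma mem_LA (l : List Char) (baseN : Nat) (hb : 0 < baseN) (a : Int) :
    (a ∈ (((PySem.List.pyRange 1 (PySem.Int.floordiv (l.length : Int) (baseN : Int) + 1)).map
        (· * (baseN : Int))).filter
      (fun d => decide (PySem.Int.mod (l.length : Int) d = 0)))) ↔
    (1 ≤ a ∧ a ≤ (l.length : Int) ∧ ((baseN : Int)) ∣ a ∧ a ∣ (l.length : Int)) := by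
  have hbi : (0 : Int) < (baseN : Int) := by exact_mod_cast hb
  rw [List.mem_filter, List.mem_map]
  constructor
  · rintro ⟨⟨k, hk, rfl⟩, hmod⟩
    rw [PySem.List.mem_pyRange_one] at hk
    have hkK : k ≤ PySem.Int.floordiv (l.length : Int) (baseN : Int) := by omega
    have hle : k * (baseN : Int) ≤ (l.length : Int) :=
      (PySem.Int.le_floordiv_iff_mul_le hbi).mp hkK
    have hdvd : (k * (baseN : Int)) ∣ (l.length : Int) := by
      rw [decide_eq_true_eq, PySem.Int.mod_eq_zero_iff_dvd] at hmod
      exact hmod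
    refine ⟨by nlinarith [hk.1], hle, Dvd.intro k (mul_comm _ _), hdvd⟩
  · rintro ⟨ha1, ha2, ⟨k, rfl⟩, hdvd⟩
    have hk1 : 1 ≤ k := by nlinarith
    refine ⟨⟨k, ?_, by ring⟩, ?_⟩
    · rw [PySem.List.mem_pyRange_one]
      have : k * (baseN : Int) ≤ (l.length : Int) := by nlinarith
      have := (PySem.Int.le_floordiv_iff_mul_le hbi).mpr this
      omega
    · rw [decide_eq_true_eq, PySem.Int.mod_eq_zero_iff_dvd]
      exact hdvd

lemma LA_pairwise (l : List Char) (baseN : Nat) (hb : 0 < baseN) :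
    ((((PySem.List.pyRange 1 (PySem.Int.floordiv (l.length : Int) (baseN : Int) + 1)).map
        (· * (baseN : Int))).filter
      (fun d => decide (PySem.Int.mod (l.length : Int) d = 0)))).Pairwise (· < ·) := by
  apply List.Pairwise.filter
  apply List.Pairwise.map
  · intro a b hab
    have hbi : (0 : Int) < (baseN : Int) := by exact_mod_cast hb
    exact mul_lt_mul_of_pos_right hab hbi
  · exact PySem.List.pairwise_lt_pyRange_one 1 _

lemma LB_pairwise (l : List Char) (p : Int → Bool) :
    (((PySem.List.pyRange 1 (l.length : Int)).filter p) ++ [(l.length : Int)]).Pairwise (· < ·) := by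
  rw [List.pairwise_append]
  refine ⟨List.Pairwise.filter p (PySem.List.pairwise_lt_pyRange_one 1 _), by simp, ?_⟩
  intro a ha b hb
  rw [List.mem_filter] at ha
  rw [PySem.List.mem_pyRange_one] at ha
  simp at hb
  omega


theorem main_eq (l : List Char) :
    (if ((l.length : Int) -
          PySem.List.pyGetD ((PySem.List.pyRange 1 (l.length : Int) 1).foldl (kmpStep l)
            (List.replicate l.length (0 : Int), 0)).1 (-1) 0) = (l.length : Int) then []
     else patLoop l (l.length : Int)
            ((l.length : Int) -
              PySem.List.pyGetD ((PySem.List.pyRange 1 (l.length : Int) 1).foldl (kmpStep l)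
                (List.replicate l.length (0 : Int), 0)).1 (-1) 0)
            (l.length + 1)
            ((l.length : Int) -
              PySem.List.pyGetD ((PySem.List.pyRange 1 (l.length : Int) 1).foldl (kmpStep l)
                (List.replicate l.length (0 : Int), 0)).1 (-1) 0) []) =
    (if ((PySem.List.pyRange 1 (l.length : Int) 1).foldl (fun acc d =>
        if PySem.Int.mod (l.length : Int) d = 0 ∧
            strMul (PySem.List.slice l none (some d)) (PySem.Int.floordiv (l.length : Int) d) = l
        then acc ++ [(String.ofList (PySem.List.slice l none (some d)), PySem.Int.floordiv (l.length : Int) d)]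
        else acc) []) = [] then []
     else ((PySem.List.pyRange 1 (l.length : Int) 1).foldl (fun acc d =>
        if PySem.Int.mod (l.length : Int) d = 0 ∧
            strMul (PySem.List.slice l none (some d)) (PySem.Int.floordiv (l.length : Int) d) = l
        then acc ++ [(String.ofList (PySem.List.slice l none (some d)), PySem.Int.floordiv (l.length : Int) d)]
        else acc) []) ++ [(String.ofList l, 1)]) := by
  by_cases hnil : l = []
  · subst hnil; rfl
  · have hlen0 : 0 < l.length := List.length_pos_iff.mpr hnil
    obtain ⟨lps, hfold, hlplen, hzero, hprev⟩ := kmp_fold l hnil l.length (by omega) le_rfl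
    rw [List.take_length] at hfold
    rw [hfold]
    have hneg : PySem.List.pyGetD lps (-1) 0 = (mb l : Int) := by
      have h1 := PySem.List.pyGetD_neg_ofNat lps 1 0 (by norm_num) (by omega)
      have h2 := hprev (l.length - 1) (by omega)
      rw [PySem.List.pyGetD_natCast, List.getD_eq_getElem?_getD,
        List.getElem?_eq_getElem (by omega),
        show l.length - 1 + 1 = l.length by omega, List.take_length] at h2
      simp only [Option.getD_some] at h2
      rw [h1, List.getElem_eq_iff (by omega)]
      rw [List.getElem_eq_iff (by omega)] at h2
      rw [show lps.length - 1 = l.length - 1 by omega]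
      exact h2
    simp only [hneg]
    by_cases hmb : mb l = 0
    · rw [hmb]
      simp only [Nat.cast_zero, sub_zero]
      rw [if_pos trivial]
      rw [Bfold_eq l]
      have hf : ((PySem.List.pyRange 1 (l.length : Int)).filter (fun d =>
          decide (PySem.Int.mod (l.length : Int) d = 0 ∧
            strMul (PySem.List.slice l none (some d)) (PySem.Int.floordiv (l.length : Int) d) = l))) = [] := by
        rw [List.filter_eq_nil_iff]
        intro a ha
        rw [PySem.List.mem_pyRange_one] at ha
        simp only [decide_eq_true_eq]
        intro hQ
        have hq := (Q_iff l hnil (by omega) (by omega)).mp hQ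
        rw [hmb, Nat.sub_zero] at hq
        have hle := Int.le_of_dvd (by omega) hq.1
        omega
      rw [hf]
      simp
    · have hmlt := mb_lt hnil
      have hAcond : ¬((l.length : Int) - (mb l : Int) = (l.length : Int)) := by omega
      rw [if_neg hAcond]
      have hcast : (l.length : Int) - (mb l : Int) = ((l.length - mb l : Nat) : Int) := by omega
      rw [hcast]
      have hb0 : 0 < l.length - mb l := by omega
      have hbi : (0 : Int) < ((l.length - mb l : Nat) : Int) := by exact_mod_cast hb0
      have hA := patLoop_spec l ((l.length - mb l : Nat) : Int) hbi (l.length + 1) 1 []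
        (by norm_num) (by push_cast; nlinarith)
      rw [one_mul, List.nil_append] at hA
      rw [hA, Bfold_eq l]
      by_cases hdvd : (l.length - mb l) ∣ l.length
      · have hmem : ((l.length - mb l : Nat) : Int) ∈ (PySem.List.pyRange 1 (l.length : Int)).filter
            (fun d => decide (PySem.Int.mod (l.length : Int) d = 0 ∧
              strMul (PySem.List.slice l none (some d)) (PySem.Int.floordiv (l.length : Int) d) = l)) := by
          rw [List.mem_filter, PySem.List.mem_pyRange_one]
          refine ⟨⟨by omega, by exact_mod_cast (by omega : l.length - mb l < l.length)⟩, ?_⟩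
          rw [decide_eq_true_eq]
          refine (Q_iff l hnil (by omega) (by exact_mod_cast (by omega : l.length - mb l < l.length))).mpr
            ⟨dvd_refl _, ?_⟩
          exact_mod_cast Int.natCast_dvd_natCast.mpr hdvd
        have hBne : ((PySem.List.pyRange 1 (l.length : Int)).filter
            (fun d => decide (PySem.Int.mod (l.length : Int) d = 0 ∧
              strMul (PySem.List.slice l none (some d)) (PySem.Int.floordiv (l.length : Int) d) = l))).map (fpat l) ≠ [] := by
          intro h
          rw [List.map_eq_nil_iff] at h
          rw [h] at hmem
          simp at hmem
        rw [if_neg hBne]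
        have hfn : fpat l ((l.length : Int)) = (String.ofList l, 1) := by
          unfold fpat
          rw [PySem.List.slice_to_natCast, List.take_length, PySem.Int.floordiv_natCast,
            Nat.div_self hlen0]
          norm_num
        rw [show ([((String.ofList l : String), (1 : Int))] : List (String × Int)) =
            List.map (fpat l) [((l.length : Int))] from by simp [hfn], ← List.map_append]
        congr 1
        apply eq_of_sorted_lt_of_mem_iff (LA_pairwise l _ hb0) (LB_pairwise l _)
        intro a
        rw [mem_LA l _ hb0 a, List.mem_append, List.mem_filter, PySem.List.mem_pyRange_one]
        simp only [List.mem_singleton, decide_eq_true_eq]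
        constructor
        · rintro ⟨h1, h2, h3, h4⟩
          by_cases hn : a = (l.length : Int)
          · right; exact hn
          · left
            refine ⟨⟨h1, lt_of_le_of_ne h2 hn⟩, ?_⟩
            exact (Q_iff l hnil h1 (lt_of_le_of_ne h2 hn)).mpr ⟨h3, h4⟩
        · rintro (⟨⟨h1, h2⟩, hQ⟩ | rfl)
          · have hq := (Q_iff l hnil h1 h2).mp hQ
            exact ⟨h1, by omega, hq.1, hq.2⟩
          · exact ⟨by omega, le_refl _, by exact_mod_cast hdvd, dvd_refl _⟩
      · have hLA : (((PySem.List.pyRange 1 (PySem.Int.floordiv (l.length : Int)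
            ((l.length - mb l : Nat) : Int) + 1)).map (· * ((l.length - mb l : Nat) : Int))).filter
            (fun d => decide (PySem.Int.mod (l.length : Int) d = 0))) = [] := by
          rw [List.eq_nil_iff_forall_not_mem]
          intro a ha
          rw [mem_LA l _ hb0 a] at ha
          obtain ⟨h1, h2, h3, h4⟩ := ha
          exact hdvd (by exact_mod_cast dvd_trans h3 h4)
        have hLB : ((PySem.List.pyRange 1 (l.length : Int)).filter
            (fun d => decide (PySem.Int.mod (l.length : Int) d = 0 ∧
              strMul (PySem.List.slice l none (some d)) (PySem.Int.floordiv (l.length : Int) d) = l))) = [] := by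
          rw [List.filter_eq_nil_iff]
          intro a ha
          rw [PySem.List.mem_pyRange_one] at ha
          simp only [decide_eq_true_eq]
          intro hQ
          have hq := (Q_iff l hnil (by omega) (by omega)).mp hQ
          exact hdvd (by exact_mod_cast dvd_trans hq.1 hq.2)
        rw [hLA, hLB]
        simp

-- ===== VERDICT (by name: the statement is the Claim_ definition above) =====
theorem all_repeating_patterns_spec : Claim_equal_all_repeating_patterns := by
  intro value _
  show _ = _
  unfold all_repeating_patterns all_repeating_patterns_alt
  exact main_eq ((PySem.Int.toStr value).toList)
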